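-- pv_equiv track=rewrite | github.com/Anant-Paliwal/Medical-Diagnosis-System | streamlit_app.py | get_symptom_severity
-- ===== SOURCE A (Python) =====
-- def get_symptom_severity(symptom):
--     """Get severity information for a symptom"""
--     severity_levels = {
--         'high': ['chest_pain', 'breathlessness', 'unconsciousness'],
--         'medium': ['fever', 'vomiting', 'fatigue'],
--         'low': ['headache', 'skin_rash', 'back_pain']
--     }
--
--     for level, symptoms in severity_levels.items():
--         if symptom in symptoms:
--             return level
--     return 'unknown'
-- ===== SOURCE B (Python) =====
-- _SEVERITY_MAP = {
--     'chest_pain': 'high', 'breathlessness': 'high', 'unconsciousness': 'high',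
--     'fever': 'medium', 'vomiting': 'medium', 'fatigue': 'medium',
--     'headache': 'low', 'skin_rash': 'low', 'back_pain': 'low',
-- }
--
-- def get_symptom_severity(symptom):
--     """Get severity information for a symptom"""
--     return _SEVERITY_MAP.get(symptom, 'unknown')
-- ===== Notes on version B (the rewrite author's own statement) =====
-- stated objective: simpler
-- what changed: Replaced the loop over the level->symptom-list dict with inner list membership scans by a single inverted symptom->level dict and one .get lookup with default 'unknown'.
import Mathlib
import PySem

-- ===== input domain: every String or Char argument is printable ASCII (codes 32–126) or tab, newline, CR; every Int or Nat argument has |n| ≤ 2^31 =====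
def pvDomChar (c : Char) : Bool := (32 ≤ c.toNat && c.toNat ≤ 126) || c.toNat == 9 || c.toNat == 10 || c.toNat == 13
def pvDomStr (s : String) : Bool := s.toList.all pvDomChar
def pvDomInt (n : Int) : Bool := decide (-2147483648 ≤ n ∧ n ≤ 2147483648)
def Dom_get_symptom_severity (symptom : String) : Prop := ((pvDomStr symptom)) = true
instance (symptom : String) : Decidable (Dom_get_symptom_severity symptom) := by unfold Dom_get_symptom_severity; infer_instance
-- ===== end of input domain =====

-- B replaces A's loop over a level→symptom-list dict with one inverted symptom→level dict lookup (objective: simpler).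

-- ===== PORT A =====
-- A: loop over the dict's (level, symptoms) items, return the first level whose list contains symptom.
def get_symptom_severity_loop (symptom : String) : List (String × List String) → String
  | [] => "unknown"
  | (level, symptoms) :: rest =>
      if symptoms.contains symptom then level
      else get_symptom_severity_loop symptom rest

def get_symptom_severity (symptom : String) : String :=
  let severity_levels : List (String × List String) :=
    [("high", ["chest_pain", "breathlessness", "unconsciousness"]),
     ("medium", ["fever", "vomiting", "fatigue"]),
     ("low", ["headache", "skin_rash", "back_pain"])]
  get_symptom_severity_loop symptom severity_levels

-- ===== PORT B =====
-- B: single flat association list symptom→level; one lookup with default "unknown".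
def severityMap : PySem.Dict String String :=
  PySem.Dict.ofList
  [("chest_pain", "high"), ("breathlessness", "high"), ("unconsciousness", "high"),
   ("fever", "medium"), ("vomiting", "medium"), ("fatigue", "medium"),
   ("headache", "low"), ("skin_rash", "low"), ("back_pain", "low")]

def get_symptom_severity_alt (symptom : String) : String :=
  PySem.Dict.getD severityMap symptom "unknown"

-- ===== PRECONDITION & SPEC =====
def Spec_get_symptom_severity (symptom : String) (out : String) : Prop := out = get_symptom_severity_alt symptom
instance (symptom : String) (out : String) : Decidable (Spec_get_symptom_severity symptom out) := by unfold Spec_get_symptom_severity; infer_instance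

-- ===== CLAIM (what is proved, stated in full; the proofs are below) =====
def Claim_equal_get_symptom_severity : Prop := ∀ (symptom : String), Dom_get_symptom_severity symptom → Spec_get_symptom_severity symptom (get_symptom_severity symptom)

-- ===== LEMMAS AND PROOFS =====
set_option maxRecDepth 4096 in
theorem get_symptom_severity_eq (symptom : String) :
    get_symptom_severity symptom = get_symptom_severity_alt symptom := by
  have hmap : severityMap = PySem.Dict.mk
      [("chest_pain", "high"), ("breathlessness", "high"), ("unconsciousness", "high"),
       ("fever", "medium"), ("vomiting", "medium"), ("fatigue", "medium"),
       ("headache", "low"), ("skin_rash", "low"), ("back_pain", "low")] := by rfl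
  unfold get_symptom_severity get_symptom_severity_alt
  rw [hmap]
  simp only [get_symptom_severity_loop, List.contains_cons, List.contains_nil,
    PySem.Dict.getD_eq_get?_getD, PySem.Dict.get?_mk_cons]
  by_cases h1 : symptom = "chest_pain" <;>
  by_cases h2 : symptom = "breathlessness" <;>
  by_cases h3 : symptom = "unconsciousness" <;>
  by_cases h4 : symptom = "fever" <;>
  by_cases h5 : symptom = "vomiting" <;>
  by_cases h6 : symptom = "fatigue" <;>
  by_cases h7 : symptom = "headache" <;>
  by_cases h8 : symptom = "skin_rash" <;>
  by_cases h9 : symptom = "back_pain"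
  all_goals try (first | subst h1 | subst h2 | subst h3 | subst h4 | subst h5
                       | subst h6 | subst h7 | subst h8 | subst h9)
  all_goals try decide
  simp [beq_iff_eq, h1, h2, h3, h4, h5, h6, h7, h8, h9,
        Ne.symm h1, Ne.symm h2, Ne.symm h3, Ne.symm h4, Ne.symm h5,
        Ne.symm h6, Ne.symm h7, Ne.symm h8, Ne.symm h9, PySem.Dict.get?]

-- ===== VERDICT (by name: the statement is the Claim_ definition above) =====
theorem get_symptom_severity_spec : Claim_equal_get_symptom_severity := by
  intro symptom _
  exact get_symptom_severity_eq symptom
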